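-- pv_equiv track=rewrite | github.com/public-apis/public-apis | contrib/api_browser/filter.py | filter_apis
-- ===== SOURCE A (Python) =====
-- from typing import List, Dict
--
-- def filter_apis(apis: List[Dict], query: str = None, category: str = None) -> List[Dict]:
--     """Filter APIs based on keyword and category.
--
--     Args:
--         apis: List of APIs to filter
--         query: Keyword to search in API name or description
--         category: Category to filter by
--
--     Returns:
--         Filtered list of APIs
--     """
--     filtered = apis.copy()
--
--     # Filter by category
--     if category:
--         filtered = [api for api in filtered if api['category'].lower() == category.lower()]
--
--     # Filter by query
--     if query:
--         query_lower = query.lower()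
--         filtered = [
--             api for api in filtered
--             if query_lower in api['name'].lower() or query_lower in api['description'].lower()
--         ]
--
--     return filtered
-- ===== SOURCE B (Python) =====
-- def filter_apis(apis, query=None, category=None):
--     """Resolve the category filter by a group-by index (dict lookup) instead of a scan,
--     then apply the query filter to the selected bucket."""
--     if category:
--         index = {}
--         for api in apis:
--             index.setdefault(api['category'].lower(), []).append(api)
--         candidates = index.get(category.lower(), [])
--     else:
--         candidates = list(apis)
--     if not query:
--         return list(candidates)
--     q = query.lower()
--     return [api for api in candidates
--             if q in api['name'].lower() or q in api['description'].lower()]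
-- ===== Notes on version B (the rewrite author's own statement) =====
-- stated objective: alternative
-- what changed: B replaces A's category-filtering comprehension with a group-by index: it builds a dict mapping lowered category to the ordered bucket of its apis, selects the bucket by one dict lookup (all apis when no category), and then applies the query filter to that bucket.
import Mathlib
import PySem

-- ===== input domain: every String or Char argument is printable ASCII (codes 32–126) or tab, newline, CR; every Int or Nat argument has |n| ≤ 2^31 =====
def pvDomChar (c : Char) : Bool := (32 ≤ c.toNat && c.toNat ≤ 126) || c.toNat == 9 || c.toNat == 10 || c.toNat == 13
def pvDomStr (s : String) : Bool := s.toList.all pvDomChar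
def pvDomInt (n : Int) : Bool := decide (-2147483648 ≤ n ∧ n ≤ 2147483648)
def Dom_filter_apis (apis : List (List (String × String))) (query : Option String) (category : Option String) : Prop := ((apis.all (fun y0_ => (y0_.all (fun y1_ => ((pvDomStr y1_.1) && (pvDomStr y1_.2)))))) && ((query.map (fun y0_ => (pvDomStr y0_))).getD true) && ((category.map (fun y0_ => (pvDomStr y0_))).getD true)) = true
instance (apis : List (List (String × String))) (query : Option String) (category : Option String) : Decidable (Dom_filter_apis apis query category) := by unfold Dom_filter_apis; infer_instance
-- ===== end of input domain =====

-- B resolves the category filter through a group-by index (dict from lowered category to its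
-- ordered bucket of apis) selected by one lookup, instead of A's filtering scan (objective: alternative).
-- Python `if category:` / `if query:` truthiness: a filter is active iff its Option is some non-empty string.

-- api[k] for k ∈ {'category','name','description'}; under Pre_ the key is present, so getD's default is never taken.
def pvGet (api : List (String × String)) (k : String) : String := PySem.Dict.getD (PySem.Dict.mk api) k ""

-- ===== PORT A =====
def filter_apis (apis : List (List (String × String))) (query : Option String) (category : Option String) : List (List (String × String)) :=
  -- filtered = apis.copy()
  let filtered := apis
  -- if category: filter by lowered category equality
  let filtered :=
    match category with
    | none => filtered
    | some c =>
      if c == "" then filtered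
      else filtered.filter (fun api =>
        PySem.Str.lower (pvGet api "category") == PySem.Str.lower c)
  -- if query: filter by substring in lowered name or description
  match query with
  | none => filtered
  | some q =>
    if q == "" then filtered
    else
      let query_lower := PySem.Str.lower q
      filtered.filter (fun api =>
        PySem.Str.isIn query_lower (PySem.Str.lower (pvGet api "name")) ||
        PySem.Str.isIn query_lower (PySem.Str.lower (pvGet api "description")))

-- ===== PORT B =====
-- for api in apis: index.setdefault(api['category'].lower(), []).append(api)
-- (setdefault+append ≡ d.modify key [] (· ++ [api]))
def pvIndex (apis : List (List (String × String))) : PySem.Dict String (List (List (String × String))) :=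
  apis.foldl
    (fun d api => PySem.Dict.modify d (PySem.Str.lower (pvGet api "category")) [] (· ++ [api]))
    PySem.Dict.empty

def filter_apis_alt (apis : List (List (String × String))) (query : Option String) (category : Option String) : List (List (String × String)) :=
  -- candidates = index bucket if category else list(apis)
  let candidates :=
    match category with
    | none => apis
    | some c =>
      if c == "" then apis
      else PySem.Dict.getD (pvIndex apis) (PySem.Str.lower c) []
  -- if not query: return list(candidates)
  match query with
  | none => candidates
  | some q =>
    if q == "" then candidates
    else
      let ql := PySem.Str.lower q
      candidates.filter (fun api =>
        PySem.Str.isIn ql (PySem.Str.lower (pvGet api "name")) ||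
        PySem.Str.isIn ql (PySem.Str.lower (pvGet api "description")))

-- ===== PRECONDITION & SPEC =====
-- Python A raises KeyError when an active filter reaches a missing key: 'category' on any api
-- when category is truthy; and when query is truthy, 'name' on any api passing the category test,
-- and 'description' on such an api whose lowered name does not contain the lowered query.
-- Pre_ requires exactly those keys to be present (B raises on exactly the same inputs).
def pvCatL (category : Option String) : Option String :=
  match category with
  | none => none
  | some c => if c == "" then none else some (PySem.Str.lower c)

def pvQL (query : Option String) : Option String :=
  match query with
  | none => none
  | some q => if q == "" then none else some (PySem.Str.lower q)

def pvCatPass (category : Option String) (api : List (String × String)) : Bool :=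
  match pvCatL category with
  | none => true
  | some cl => PySem.Str.lower (pvGet api "category") == cl

def Pre_filter_apis (apis : List (List (String × String))) (query : Option String) (category : Option String) : Prop :=
  ∀ api ∈ apis,
    ((pvCatL category).isSome = true → PySem.Dict.contains (PySem.Dict.mk api) "category" = true) ∧
    (∀ ql, pvQL query = some ql → pvCatPass category api = true →
      PySem.Dict.contains (PySem.Dict.mk api) "name" = true ∧
      (PySem.Str.isIn ql (PySem.Str.lower (pvGet api "name")) = false →
        PySem.Dict.contains (PySem.Dict.mk api) "description" = true))

instance (apis : List (List (String × String))) (query : Option String) (category : Option String) : Decidable (Pre_filter_apis apis query category) := by unfold Pre_filter_apis; infer_instance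

def pvWitness_filter_apis : (List (List (String × String))) × Option String × Option String :=
  ([[("category", "Animals"), ("name", "Cat Facts"), ("description", "facts about cats")],
    [("category", "Books"), ("name", "OpenLibrary"), ("description", "books")]],
   some "cat", some "animals")

def Spec_filter_apis (apis : List (List (String × String))) (query : Option String) (category : Option String) (out : List (List (String × String))) : Prop := out = filter_apis_alt apis query category
instance (apis : List (List (String × String))) (query : Option String) (category : Option String) (out : List (List (String × String))) : Decidable (Spec_filter_apis apis query category out) := by unfold Spec_filter_apis; infer_instance

-- ===== CLAIM =====
def Claim_equal_filter_apis : Prop := ∀ (apis : List (List (String × String))) (query : Option String) (category : Option String), Dom_filter_apis apis query category → Pre_filter_apis apis query category → Spec_filter_apis apis query category (filter_apis apis query category)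

-- ===== LEMMAS AND PROOFS =====

-- The bucket of the group-by index at cl is exactly A's category-filtered list (same order).
theorem pvIndex_bucket (apis : List (List (String × String))) (cl : String) :
    PySem.Dict.getD (pvIndex apis) cl []
      = apis.filter (fun api => PySem.Str.lower (pvGet api "category") == cl) := by
  unfold pvIndex
  rw [← List.foldl_map (f := fun api => (PySem.Str.lower (pvGet api "category"), api))
        (g := fun (d : PySem.Dict String (List (List (String × String)))) p =>
          PySem.Dict.modify d p.1 [] (· ++ [p.2]))]
  rw [PySem.Dict.getD_foldl_modify_append]
  simp [List.filter_map, Function.comp_def]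

-- ===== VERDICT =====
theorem filter_apis_spec : Claim_equal_filter_apis := by
  intro apis query category _ _
  unfold Spec_filter_apis filter_apis filter_apis_alt
  cases category with
  | none => rfl
  | some c =>
    by_cases hc : c = ""
    · simp [hc]
    · simp only [beq_iff_eq, hc, if_false, pvIndex_bucket]
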